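-- pv_equiv track=rewrite | github.com/charsyam/suki-helper | src/suki_helper/search/ranker.py | _adjacency_rank
-- ===== SOURCE A (Python) =====
-- SEPARATOR_CHARACTERS = {" ", "\t", "\n", "\r", "-", "_", "/", ".", ","}
--
-- def _adjacency_rank(
--     original_text: str,
--     ordered_span: tuple[int, int],
--     query_tokens: list[str],
-- ) -> int:
--     lowered_text = original_text.lower()
--     lowered_tokens = [token.lower() for token in query_tokens if token]
--     if not lowered_tokens:
--         return 0
--
--     boundaries: list[tuple[int, int]] = []
--     search_start = ordered_span[0]
--     for token in lowered_tokens: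
--         position = lowered_text.find(token, search_start)
--         if position < 0:
--             return 0
--         boundaries.append((position, position + len(token)))
--         search_start = position + len(token)
--
--     if len(boundaries) == 1:
--         return 3
--
--     gap_segments = [
--         original_text[boundaries[index][1] : boundaries[index + 1][0]]
--         for index in range(len(boundaries) - 1)
--     ]
--     if all(segment == "" for segment in gap_segments):
--         return 4
--     if all(segment and _is_punctuation_only(segment) for segment in gap_segments):
--         return 3
--     if all(segment and segment.isspace() for segment in gap_segments):
--         return 2
--     return 1
--
-- def _is_punctuation_only(text: str) -> bool:
--     return all(
--         (not character.isalnum()) and (not character.isspace()) and character in SEPARATOR_CHARACTERS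
--         for character in text
--     )
-- ===== SOURCE B (Python) =====
-- _PUNCT = {"-", "_", "/", ".", ","}
--
--
-- def _classify(segment):
--     # 0 = empty, 1 = punctuation-only, 2 = whitespace, 3 = anything else
--     if not segment:
--         return 0
--     if all(character in _PUNCT for character in segment):
--         return 1
--     if segment.isspace():
--         return 2
--     return 3
--
--
-- def _adjacency_rank(original_text, ordered_span, query_tokens):
--     lowered_text = original_text.lower()
--     search_start = ordered_span[0]
--     prev_end = None
--     category = None
--     mixed = False
--     for token in query_tokens:
--         if not token:
--             continue
--         position = lowered_text.find(token.lower(), search_start)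
--         if position < 0:
--             return 0
--         if prev_end is not None:
--             gap_category = _classify(original_text[prev_end:position])
--             if category is None:
--                 category = gap_category
--             elif gap_category != category:
--                 mixed = True
--         prev_end = position + len(token)
--         search_start = prev_end
--     if prev_end is None:
--         return 0
--     if category is None:
--         return 3
--     if mixed:
--         return 1
--     return (4, 3, 2, 1)[category]
-- ===== Notes on version B (the rewrite author's own statement) =====
-- stated objective: simpler
-- what changed: Replaces the materialised gap_segments list and the three separate all() rescans with a single streaming pass that classifies each gap into one category (empty/punctuation/space/other) as soon as its boundaries are known and tracks only the first category plus a mixed flag, deciding the rank from uniformity; the per-char test collapses to membership in the five non-space separators.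
import Mathlib
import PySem

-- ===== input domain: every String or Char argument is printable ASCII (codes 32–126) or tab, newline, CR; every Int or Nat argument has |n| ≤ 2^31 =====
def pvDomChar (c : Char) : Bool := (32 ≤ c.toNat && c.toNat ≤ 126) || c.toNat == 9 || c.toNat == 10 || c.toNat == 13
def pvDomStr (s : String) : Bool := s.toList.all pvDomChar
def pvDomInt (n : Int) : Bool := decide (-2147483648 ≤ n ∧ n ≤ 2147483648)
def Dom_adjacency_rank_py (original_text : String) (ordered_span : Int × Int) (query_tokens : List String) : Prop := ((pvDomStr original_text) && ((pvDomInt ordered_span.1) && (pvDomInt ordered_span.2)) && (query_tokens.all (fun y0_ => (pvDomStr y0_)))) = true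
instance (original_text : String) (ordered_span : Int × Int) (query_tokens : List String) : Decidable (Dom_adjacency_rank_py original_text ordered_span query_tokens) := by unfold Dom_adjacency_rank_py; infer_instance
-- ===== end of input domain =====

-- B folds one streaming classification pass over consecutive boundary pairs instead of
-- building the gap list and rescanning it with several all() passes (objective: simpler).

-- ===== PORT A =====
-- SEPARATOR_CHARACTERS
def pvSep : List Char := [' ', '\t', '\n', '\r', '-', '_', '/', '.', ',']

-- _is_punctuation_only
def pvIsPunctOnly (text : List Char) : Bool :=
  text.all (fun c => !PySem.Chars.isalnum c && !PySem.Chars.isspace c && pvSep.contains c)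

-- the boundary-building loop of A (early 'return 0' = none)
def pvFindBounds (lowered : List Char) (toks : List (List Char)) (searchStart : Int)
    (acc : List (Int × Int)) : Option (List (Int × Int)) :=
  match toks with
  | [] => some acc
  | tok :: rest =>
    let position := PySem.Chars.findFrom lowered tok searchStart none
    if position < 0 then none
    else pvFindBounds lowered rest (position + tok.length)
           (acc ++ [(position, position + (tok.length : Int))])

-- the gap_segments comprehension (range indexing, as in A)
def pvGapSegs (t : List Char) (bs : List (Int × Int)) : List (List Char) :=
  (PySem.List.pyRange 0 ((bs.length : Int) - 1) 1).map (fun i =>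
    PySem.List.slice t (some ((PySem.List.pyGet? bs i).getD (0, 0)).2)
                       (some ((PySem.List.pyGet? bs (i + 1)).getD (0, 0)).1))

def adjacency_rank_py (original_text : String) (ordered_span : Int × Int) (query_tokens : List String) : Int :=
  let lowered_text := PySem.Chars.lower original_text.toList
  let lowered_tokens := (query_tokens.filter (fun tok => !(tok == ""))).map
    (fun tok => PySem.Chars.lower tok.toList)
  if lowered_tokens.isEmpty then 0
  else
    match pvFindBounds lowered_text lowered_tokens ordered_span.1 [] with
    | none => 0
    | some boundaries =>
      if boundaries.length == 1 then 3
      else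
        let gap_segments := pvGapSegs original_text.toList boundaries
        if gap_segments.all (fun s => s.isEmpty) then 4
        else if gap_segments.all (fun s => !s.isEmpty && pvIsPunctOnly s) then 3
        else if gap_segments.all (fun s => !s.isEmpty && PySem.Chars.strIsspace s) then 2
        else 1

-- ===== PORT B =====
-- _PUNCT
def pvPunct : List Char := ['-', '_', '/', '.', ',']

-- _classify: 0 empty, 1 punctuation-only, 2 whitespace, 3 other
def pvClassify (segment : List Char) : Nat :=
  if segment.isEmpty then 0
  else if segment.all (fun c => pvPunct.contains c) then 1
  else if PySem.Chars.strIsspace segment then 2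
  else 3

-- the single loop of B, carrying (search_start, prev_end, category, mixed)
def pvAltAux (t lowered : List Char) (toks : List String) (search : Int)
    (prevEnd : Option Int) (category : Option Nat) (mixed : Bool) : Int :=
  match toks with
  | [] =>
    match prevEnd with
    | none => 0
    | some _ =>
      match category with
      | none => 3
      | some c => if mixed then 1 else ([(4 : Int), 3, 2, 1]).getD c 1
  | tok :: rest =>
    if tok == "" then pvAltAux t lowered rest search prevEnd category mixed
    else
      let position := PySem.Chars.findFrom lowered (PySem.Chars.lower tok.toList) search none
      if position < 0 then 0
      else
        let nxt := position + (tok.toList.length : Int)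
        match prevEnd with
        | none => pvAltAux t lowered rest nxt (some nxt) category mixed
        | some e =>
          let gc := pvClassify (PySem.List.slice t (some e) (some position))
          match category with
          | none => pvAltAux t lowered rest nxt (some nxt) (some gc) mixed
          | some c => pvAltAux t lowered rest nxt (some nxt) (some c) (mixed || !(gc == c))

def adjacency_rank_py_alt (original_text : String) (ordered_span : Int × Int) (query_tokens : List String) : Int :=
  pvAltAux original_text.toList (PySem.Chars.lower original_text.toList) query_tokens
    ordered_span.1 none none false

-- ===== PRECONDITION & SPEC =====
def Spec_adjacency_rank_py (original_text : String) (ordered_span : Int × Int) (query_tokens : List String) (out : Int) : Prop := out = adjacency_rank_py_alt original_text ordered_span query_tokens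
instance (original_text : String) (ordered_span : Int × Int) (query_tokens : List String) (out : Int) : Decidable (Spec_adjacency_rank_py original_text ordered_span query_tokens out) := by unfold Spec_adjacency_rank_py; infer_instance

-- ===== CLAIM (what is proved, stated in full; the proofs are below) =====
def Claim_equal_adjacency_rank_py : Prop := ∀ (original_text : String) (ordered_span : Int × Int) (query_tokens : List String), Dom_adjacency_rank_py original_text ordered_span query_tokens → Spec_adjacency_rank_py original_text ordered_span query_tokens (adjacency_rank_py original_text ordered_span query_tokens)


-- ===== LEMMAS AND PROOFS =====

-- proof-side helpers: the streaming state machine of B, abstracted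
def pvStep (cm : Option Nat × Bool) (g : Nat) : Option Nat × Bool :=
  match cm with
  | (none, m) => (some g, m)
  | (some c, m) => (some c, m || !(g == c))

def pvChainCat (t : List Char) (e : Int) (cm : Option Nat × Bool)
    (bs : List (Int × Int)) : Option Nat × Bool :=
  match bs with
  | [] => cm
  | (p, q) :: rest =>
    pvChainCat t q (pvStep cm (pvClassify (PySem.List.slice t (some e) (some p)))) rest

def pvFinishB : Option Nat × Bool → Int
  | (none, _) => 3
  | (some c, m) => if m then 1 else ([(4 : Int), 3, 2, 1]).getD c 1

def pvGapsOf (t : List Char) (e : Int) (bs : List (Int × Int)) : List (List Char) :=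
  match bs with
  | [] => []
  | (p, q) :: rest => PySem.List.slice t (some e) (some p) :: pvGapsOf t q rest

def pvIfChain (gs : List (List Char)) : Int :=
  if gs.all (fun s => s.isEmpty) then 4
  else if gs.all (fun s => !s.isEmpty && pvIsPunctOnly s) then 3
  else if gs.all (fun s => !s.isEmpty && PySem.Chars.strIsspace s) then 2
  else 1

-- character-level facts
lemma pvPunct_sub_sep (c : Char) (h : c ∈ pvPunct) : c ∈ pvSep := by
  fin_cases h <;> decide

lemma pvPE (c : Char) :
    (!PySem.Chars.isalnum c && !PySem.Chars.isspace c && pvSep.contains c)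
      = pvPunct.contains c := by
  by_cases h : c ∈ pvSep
  · fin_cases h <;> decide
  · have h2 : c ∉ pvPunct := fun hc => h (pvPunct_sub_sep c hc)
    simp [h, h2]

lemma pvPunct_not_space (c : Char) (h : c ∈ pvPunct) : PySem.Chars.isspace c = false := by
  fin_cases h <;> decide

lemma pvIsPunctOnly_eq (g : List Char) :
    pvIsPunctOnly g = g.all (fun c => pvPunct.contains c) := by
  unfold pvIsPunctOnly
  rw [show (fun c => (!PySem.Chars.isalnum c && !PySem.Chars.isspace c && pvSep.contains c))
      = (fun c => pvPunct.contains c) from funext pvPE]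

-- classification ↔ the three all() predicates of A
lemma pvCls0 (g : List Char) : pvClassify g = 0 ↔ g.isEmpty = true := by
  unfold pvClassify; split_ifs <;> simp_all

lemma pvStrIsspace_eq (g : List Char) :
    PySem.Chars.strIsspace g = (!g.isEmpty && g.all PySem.Chars.isspace) := by
  simp [PySem.Chars.strIsspace]

lemma pvPunctOnly_not_space (g : List Char) (h1 : g.isEmpty = false)
    (h2 : g.all (fun c => pvPunct.contains c) = true) :
    PySem.Chars.strIsspace g = false := by
  rw [pvStrIsspace_eq]
  cases g with
  | nil => simp at h1
  | cons a l =>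
    have ha : a ∈ pvPunct := by
      have := List.all_eq_true.mp h2 a (by simp)
      simpa using this
    simp [List.all_cons, pvPunct_not_space a ha]

lemma pvCls1 (g : List Char) :
    pvClassify g = 1 ↔ (!g.isEmpty && pvIsPunctOnly g) = true := by
  rw [show (!g.isEmpty && pvIsPunctOnly g) = (!g.isEmpty && g.all (fun c => pvPunct.contains c)) by
    rw [pvIsPunctOnly_eq]]
  unfold pvClassify; split_ifs <;> simp_all

lemma pvCls2 (g : List Char) :
    pvClassify g = 2 ↔ (!g.isEmpty && PySem.Chars.strIsspace g) = true := by
  unfold pvClassify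
  split_ifs with h1 h2 h3
  · simp_all
  · have := pvPunctOnly_not_space g (by simpa using h1) h2
    simp_all
  · simp [h1, h3]
  · have : PySem.Chars.strIsspace g = false := by simpa using h3
    simp [this]

lemma pvCls2_not_punct (g : List Char) (h : pvClassify g = 2) :
    (!g.isEmpty && pvIsPunctOnly g) = false := by
  unfold pvClassify at h
  split_ifs at h with h1 h2 h3 <;> simp_all [pvIsPunctOnly_eq]

-- the chain fold characterised by the gap list
lemma pvChainCat_some (t : List Char) (bs : List (Int × Int)) :
    ∀ (e : Int) (c : Nat) (m : Bool),
      pvChainCat t e (some c, m) bs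
        = (some c, m || !((pvGapsOf t e bs).all (fun g => pvClassify g == c))) := by
  induction bs with
  | nil => intro e c m; simp [pvChainCat, pvGapsOf]
  | cons hd rest ih =>
    intro e c m
    obtain ⟨p, q⟩ := hd
    simp only [pvChainCat, pvStep, pvGapsOf, List.all_cons]
    rw [ih]
    congr 1
    simp [Bool.not_and, Bool.or_assoc]

-- the heart: B's uniformity decision equals A's if-chain on a nonempty gap list
lemma pvF (t : List Char) (e p q : Int) (bs : List (Int × Int)) :
    pvIfChain (pvGapsOf t e ((p, q) :: bs))
      = pvFinishB (pvChainCat t e (none, false) ((p, q) :: bs)) := by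
  simp only [pvChainCat, pvStep, pvGapsOf]
  rw [pvChainCat_some]
  set g0 := PySem.List.slice t (some e) (some p) with hg0
  set gs := pvGapsOf t q bs with hgs
  set c0 := pvClassify g0 with hc0
  by_cases hall : gs.all (fun g => pvClassify g == c0) = true
  · -- uniform: every gap classifies as c0
    have hmem : ∀ g ∈ g0 :: gs, pvClassify g = c0 := by
      intro g hg
      rcases List.mem_cons.mp hg with h | h
      · rw [h]
      · simpa using (List.all_eq_true.mp hall) g h
    simp only [pvFinishB, hall, Bool.not_true, Bool.false_or]
    have hcase : c0 = 0 ∨ c0 = 1 ∨ c0 = 2 ∨ c0 = 3 := by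
      unfold pvClassify at hc0; split_ifs at hc0 <;> omega
    unfold pvIfChain
    rcases hcase with h0 | h1 | h2 | h3
    · have : ∀ g ∈ g0 :: gs, g.isEmpty = true := fun g hg => (pvCls0 g).mp (by rw [hmem g hg, h0])
      rw [if_pos (List.all_eq_true.mpr this)]
      simp [h0]
    · have hne : ¬ ((g0 :: gs).all (fun s => s.isEmpty) = true) := by
        intro hA
        have := (List.all_eq_true.mp hA) g0 (by simp)
        have := (pvCls0 g0).mpr this
        omega
      rw [if_neg hne]
      have : ∀ g ∈ g0 :: gs, (!g.isEmpty && pvIsPunctOnly g) = true :=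
        fun g hg => (pvCls1 g).mp (by rw [hmem g hg, h1])
      rw [if_pos (List.all_eq_true.mpr this)]
      simp [h1]
    · have hne : ¬ ((g0 :: gs).all (fun s => s.isEmpty) = true) := by
        intro hA
        have := (pvCls0 g0).mpr ((List.all_eq_true.mp hA) g0 (by simp))
        omega
      rw [if_neg hne]
      have hne2 : ¬ ((g0 :: gs).all (fun s => (!s.isEmpty && pvIsPunctOnly s)) = true) := by
        intro hA
        have := (List.all_eq_true.mp hA) g0 (by simp)
        have := pvCls2_not_punct g0 (by rw [← hc0, h2])
        simp_all
      rw [if_neg hne2]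
      have : ∀ g ∈ g0 :: gs, (!g.isEmpty && PySem.Chars.strIsspace g) = true :=
        fun g hg => (pvCls2 g).mp (by rw [hmem g hg, h2])
      rw [if_pos (List.all_eq_true.mpr this)]
      simp [h2]
    · have h0' : pvClassify g0 = 3 := by rw [← hc0, h3]
      have hne : ¬ ((g0 :: gs).all (fun s => s.isEmpty) = true) := by
        intro hA
        have := (pvCls0 g0).mpr ((List.all_eq_true.mp hA) g0 (by simp))
        omega
      have hne2 : ¬ ((g0 :: gs).all (fun s => (!s.isEmpty && pvIsPunctOnly s)) = true) := by
        intro hA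
        have := (pvCls1 g0).mpr ((List.all_eq_true.mp hA) g0 (by simp))
        omega
      have hne3 : ¬ ((g0 :: gs).all (fun s => (!s.isEmpty && PySem.Chars.strIsspace s)) = true) := by
        intro hA
        have := (pvCls2 g0).mpr ((List.all_eq_true.mp hA) g0 (by simp))
        omega
      rw [if_neg hne, if_neg hne2, if_neg hne3]
      simp [h3]
  · -- mixed categories: A fails every all() check, B sees the mixed flag
    have hallf : (gs.all fun g => pvClassify g == c0) = false :=
      Bool.eq_false_iff.mpr (fun hh => hall hh)
    rw [hallf]
    simp only [pvFinishB, Bool.not_false, Bool.or_true]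
    obtain ⟨gx, hgx, hgne'⟩ := List.all_eq_false.mp hallf
    have hgne : pvClassify gx ≠ c0 := by simpa using hgne'
    unfold pvIfChain
    have hne1 : ¬ ((g0 :: gs).all (fun s => s.isEmpty) = true) := by
      intro hA
      have ha := (pvCls0 g0).mpr ((List.all_eq_true.mp hA) g0 (by simp))
      have hb := (pvCls0 gx).mpr ((List.all_eq_true.mp hA) gx (by simp [hgx]))
      rw [hc0] at hgne; omega
    have hne2 : ¬ ((g0 :: gs).all (fun s => (!s.isEmpty && pvIsPunctOnly s)) = true) := by
      intro hA
      have ha := (pvCls1 g0).mpr ((List.all_eq_true.mp hA) g0 (by simp))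
      have hb := (pvCls1 gx).mpr ((List.all_eq_true.mp hA) gx (by simp [hgx]))
      rw [hc0] at hgne; omega
    have hne3 : ¬ ((g0 :: gs).all (fun s => (!s.isEmpty && PySem.Chars.strIsspace s)) = true) := by
      intro hA
      have ha := (pvCls2 g0).mpr ((List.all_eq_true.mp hA) g0 (by simp))
      have hb := (pvCls2 gx).mpr ((List.all_eq_true.mp hA) gx (by simp [hgx]))
      rw [hc0] at hgne; omega
    rw [if_neg hne1, if_neg hne2, if_neg hne3]
    simp

-- A's range-indexed gap comprehension equals the structural chain of gaps
lemma pvGapSegs_eq_zip (t : List Char) (bs : List (Int × Int)) :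
    pvGapSegs t bs
      = (bs.zip bs.tail).map
          (fun ab => PySem.List.slice t (some ab.1.2) (some ab.2.1)) := by
  unfold pvGapSegs
  apply List.ext_getElem
  · simp [PySem.List.length_pyRange_one, List.length_zip]
  · intro i h1 h2
    have hi : i < bs.length - 1 := by
      simpa [PySem.List.length_pyRange_one] using h1
    have hib : i < bs.length := by omega
    have hib1 : i + 1 < bs.length := by omega
    have htl : i < bs.tail.length := by simp [List.length_tail]; omega
    simp only [List.getElem_map, PySem.List.getElem_pyRange_one, List.getElem_zip,
      List.getElem_tail]
    rw [show (0 : Int) + (i : Int) = ((i : Nat) : Int) by ring]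
    have e1 : PySem.List.pyGet? bs ((i : Nat) : Int) = bs[i]? := PySem.List.pyGet?_natCast bs i
    have e2 : PySem.List.pyGet? bs (((i : Nat) : Int) + 1) = bs[i+1]? := by
      rw [show (((i : Nat) : Int) + 1) = (((i + 1 : Nat)) : Int) by push_cast; ring]
      exact PySem.List.pyGet?_natCast bs (i + 1)
    rw [e1, e2, List.getElem?_eq_getElem hib, List.getElem?_eq_getElem hib1]
    rfl

lemma pvZip_eq_gapsOf (t : List Char) (bs : List (Int × Int)) :
    ∀ (p q : Int),
      ((((p, q) :: bs)).zip bs).map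
          (fun ab => PySem.List.slice t (some ab.1.2) (some ab.2.1))
        = pvGapsOf t q bs := by
  induction bs with
  | nil => intro p q; simp [pvGapsOf]
  | cons hd rest ih =>
    intro p q
    obtain ⟨p1, q1⟩ := hd
    simp only [List.zip_cons_cons, List.map_cons, pvGapsOf]
    rw [ih p1 q1]

-- the accumulator of pvFindBounds is a pure prefix
lemma pvFindBounds_acc (lowered : List Char) (toks : List (List Char)) :
    ∀ (s : Int) (acc : List (Int × Int)),
      pvFindBounds lowered toks s acc
        = (pvFindBounds lowered toks s []).map (acc ++ ·) := by
  induction toks with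
  | nil => intro s acc; simp [pvFindBounds]
  | cons tok rest ih =>
    intro s acc
    simp only [pvFindBounds, List.nil_append]
    split_ifs with h
    · rfl
    · set pos := PySem.Chars.findFrom lowered tok s none with hp
      set b := (pos, pos + (tok.length : Int)) with hb
      rw [ih _ (acc ++ [b]), ih _ [b]]
      cases pvFindBounds lowered rest (pos + (tok.length : Int)) [] <;> simp

lemma pvLower_length (l : List Char) : (PySem.Chars.lower l).length = l.length := by
  simp [PySem.Chars.lower]

-- main loop correspondence once a first token has been matched
lemma pvMain (t lowered : List Char) (toks : List String) :
    ∀ (search e : Int) (cat : Option Nat) (m : Bool),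
      pvAltAux t lowered toks search (some e) cat m
        = match pvFindBounds lowered
            ((toks.filter (fun tok => !(tok == ""))).map
              (fun tok => PySem.Chars.lower tok.toList)) search [] with
          | none => 0
          | some bs => pvFinishB (pvChainCat t e (cat, m) bs) := by
  induction toks with
  | nil =>
    intro search e cat m
    simp only [pvAltAux, List.filter_nil, List.map_nil, pvFindBounds, pvChainCat]
    cases cat <;> simp [pvFinishB]
  | cons tok rest ih =>
    intro search e cat m
    by_cases htok : tok == ""
    · have h1 : List.filter (fun tok => !(tok == "")) (tok :: rest)
          = List.filter (fun tok => !(tok == "")) rest := by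
        simp [htok]
      rw [show pvAltAux t lowered (tok :: rest) search (some e) cat m
            = pvAltAux t lowered rest search (some e) cat m by
          simp only [pvAltAux]; rw [if_pos htok], ih, h1]
    · have hfalse : (tok == "") = false := by
        cases h : (tok == "") with
        | false => rfl
        | true => exact absurd h htok
      simp only [pvAltAux, List.filter_cons, hfalse, Bool.not_false, Bool.false_eq_true,
        if_false, if_true, List.map_cons, pvFindBounds, pvLower_length,
        List.nil_append, String.length_toList]
      split_ifs with hpos
      · rfl
      · rw [pvFindBounds_acc]
        cases hres : pvFindBounds lowered
            ((rest.filter (fun tok => !(tok == ""))).map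
              (fun tok => PySem.Chars.lower tok.toList))
            (PySem.Chars.findFrom lowered (PySem.Chars.lower tok.toList) search none
              + (tok.length : Int)) [] with
        | none => cases cat <;> (dsimp only; rw [ih]; rw [hres]; simp)
        | some bs => cases cat <;> (dsimp only; rw [ih]; rw [hres]; simp [pvChainCat, pvStep])

-- the not-yet-matched phase: before the first token is found
lemma pvStart (t lowered : List Char) (toks : List String) :
    ∀ (s : Int) (cat : Option Nat) (m : Bool),
      pvAltAux t lowered toks s none cat m
        = match pvFindBounds lowered
            ((toks.filter (fun tok => !(tok == ""))).map
              (fun tok => PySem.Chars.lower tok.toList)) s [] with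
          | none => 0
          | some [] => 0
          | some ((_, q) :: bs) => pvFinishB (pvChainCat t q (cat, m) bs) := by
  induction toks with
  | nil => intro s cat m; simp [pvAltAux, pvFindBounds]
  | cons tok rest ih =>
    intro s cat m
    by_cases htok : tok == ""
    · have h1 : List.filter (fun tok => !(tok == "")) (tok :: rest)
          = List.filter (fun tok => !(tok == "")) rest := by
        simp [htok]
      rw [show pvAltAux t lowered (tok :: rest) s none cat m
            = pvAltAux t lowered rest s none cat m by
          simp only [pvAltAux]; rw [if_pos htok], ih, h1]
    · have hfalse : (tok == "") = false := by
        cases h : (tok == "") with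
        | false => rfl
        | true => exact absurd h htok
      simp only [pvAltAux, List.filter_cons, hfalse, Bool.not_false, Bool.false_eq_true,
        if_false, if_true, List.map_cons, pvFindBounds, pvLower_length,
        List.nil_append, String.length_toList]
      split_ifs with hpos
      · rfl
      · rw [pvFindBounds_acc, pvMain]
        cases hres : pvFindBounds lowered
            ((rest.filter (fun tok => !(tok == ""))).map
              (fun tok => PySem.Chars.lower tok.toList))
            (PySem.Chars.findFrom lowered (PySem.Chars.lower tok.toList) s none
              + (tok.length : Int)) [] with
        | none => simp
        | some bs => simp

-- a successful boundary search returns one pair per token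
lemma pvFindBounds_len (lowered : List Char) (toks : List (List Char)) :
    ∀ (s : Int) (acc bs : List (Int × Int)),
      pvFindBounds lowered toks s acc = some bs → bs.length = acc.length + toks.length := by
  induction toks with
  | nil =>
    intro s acc bs h
    simp [pvFindBounds] at h
    simp [← h]
  | cons tok rest ih =>
    intro s acc bs h
    simp only [pvFindBounds] at h
    split_ifs at h with hpos
    · have := ih _ _ _ h
      simp at this ⊢
      omega

-- ===== VERDICT (by name: the statement is the Claim_ definition above) =====
theorem adjacency_rank_py_spec : Claim_equal_adjacency_rank_py := by
  intro original_text ordered_span query_tokens _dom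
  unfold Spec_adjacency_rank_py adjacency_rank_py adjacency_rank_py_alt
  rw [pvStart]
  cases hres : pvFindBounds (PySem.Chars.lower original_text.toList)
      ((query_tokens.filter (fun tok => !(tok == ""))).map
        (fun tok => PySem.Chars.lower tok.toList)) ordered_span.1 [] with
  | none =>
    cases hf : (query_tokens.filter (fun tok => !(tok == ""))).map
        (fun tok => PySem.Chars.lower tok.toList) with
    | nil => simp [hf, pvFindBounds] at hres
    | cons a l => rw [hf] at hres; simp [hres]
  | some bs =>
    cases hf : (query_tokens.filter (fun tok => !(tok == ""))).map
        (fun tok => PySem.Chars.lower tok.toList) with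
    | nil =>
      rw [hf] at hres
      simp [pvFindBounds] at hres
      subst hres
      rfl
    | cons a l =>
      rw [hf] at hres
      have hlen := pvFindBounds_len _ _ _ _ _ hres
      simp only [hres, List.isEmpty_cons, Bool.false_eq_true, if_false]
      cases bs with
      | nil => simp at hlen
      | cons hd tl =>
        cases tl with
        | nil => simp [pvChainCat, pvFinishB]
        | cons x xs =>
          have hlen2 : ((hd :: x :: xs).length == 1) = false := by simp
          rw [hlen2]
          obtain ⟨p0, q0⟩ := hd
          obtain ⟨p1, q1⟩ := x
          rw [show pvGapSegs original_text.toList ((p0, q0) :: (p1, q1) :: xs)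
                = pvGapsOf original_text.toList q0 ((p1, q1) :: xs) by
            rw [pvGapSegs_eq_zip]
            exact pvZip_eq_gapsOf original_text.toList ((p1, q1) :: xs) p0 q0]
          have hF := pvF original_text.toList q0 p1 q1 xs
          unfold pvIfChain at hF
          simpa using hF
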